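-- pv_equiv track=rewrite | github.com/alexanderfrey/reasonable | clean_texts.py | detect_header_footer
-- ===== SOURCE A (Python) =====
-- from typing import List, Tuple
--
-- def detect_header_footer(lines: List[str]) -> Tuple[int, int]:
--     """Detect Gutenberg header and footer boundaries."""
--     start_markers = [
--         "*** START OF THIS PROJECT GUTENBERG",
--         "*** START OF THE PROJECT GUTENBERG",
--         "*END*THE SMALL PRINT"
--     ]
--     end_markers = [
--         "*** END OF THIS PROJECT GUTENBERG",
--         "*** END OF THE PROJECT GUTENBERG",
--         "End of Project Gutenberg's"
--     ]
--
--     header_end = 0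
--     footer_start = len(lines)
--
--     for i, line in enumerate(lines):
--         if any(marker in line for marker in start_markers):
--             header_end = i + 1
--             break
--
--     for i in range(len(lines) - 1, -1, -1):
--         if any(marker in lines[i] for marker in end_markers):
--             footer_start = i
--             break
--
--     return header_end, footer_start
-- ===== SOURCE B (Python) =====
-- from typing import List, Tuple
--
-- def detect_header_footer(lines: List[str]) -> Tuple[int, int]:
--     """Detect Gutenberg header and footer boundaries (single forward pass)."""
--     start_markers = [
--         "*** START OF THIS PROJECT GUTENBERG",
--         "*** START OF THE PROJECT GUTENBERG",
--         "*END*THE SMALL PRINT"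
--     ]
--     end_markers = [
--         "*** END OF THIS PROJECT GUTENBERG",
--         "*** END OF THE PROJECT GUTENBERG",
--         "End of Project Gutenberg's"
--     ]
--     header_end = 0
--     header_found = False
--     footer_start = len(lines)
--     for i, line in enumerate(lines):
--         if not header_found and any(m in line for m in start_markers):
--             header_end = i + 1
--             header_found = True
--         if any(m in line for m in end_markers):
--             footer_start = i
--     return header_end, footer_start
-- ===== Notes on version B (the rewrite author's own statement) =====
-- stated objective: alternative
-- what changed: Replaces A's two sequential scans (forward break for the header, explicit backward index loop for the footer) by one accumulating forward pass over enumerate(lines) that sets header_end once via a flag and overwrites footer_start on every end-marker hit so the last match wins.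
import Mathlib
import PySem

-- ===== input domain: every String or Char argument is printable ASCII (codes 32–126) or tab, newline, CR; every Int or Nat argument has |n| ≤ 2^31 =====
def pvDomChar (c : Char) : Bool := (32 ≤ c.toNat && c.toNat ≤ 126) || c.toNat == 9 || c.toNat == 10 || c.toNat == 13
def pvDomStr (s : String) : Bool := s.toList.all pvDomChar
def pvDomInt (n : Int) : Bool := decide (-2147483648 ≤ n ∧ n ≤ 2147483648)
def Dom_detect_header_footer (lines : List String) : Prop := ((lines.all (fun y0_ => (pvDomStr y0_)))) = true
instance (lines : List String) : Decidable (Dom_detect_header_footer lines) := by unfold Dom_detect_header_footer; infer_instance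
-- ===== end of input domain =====

-- B replaces A's two sequential scans by one accumulating forward pass (alternative decomposition, same cost).

-- shared marker predicates (identical literal lists in both Pythons)
def pvStartMarkers : List String :=
  ["*** START OF THIS PROJECT GUTENBERG",
   "*** START OF THE PROJECT GUTENBERG",
   "*END*THE SMALL PRINT"]
def pvEndMarkers : List String :=
  ["*** END OF THIS PROJECT GUTENBERG",
   "*** END OF THE PROJECT GUTENBERG",
   "End of Project Gutenberg's"]
-- any(marker in line for marker in markers)
def pvIsStart (line : String) : Bool := pvStartMarkers.any (fun m => PySem.Str.isIn m line)
def pvIsEnd (line : String) : Bool := pvEndMarkers.any (fun m => PySem.Str.isIn m line)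

-- ===== PORT A =====
-- first for-loop: break on the first start-marker line (header_end stays h₀ = 0 otherwise)
def pvHdrLoop : List (Int × String) → Int → Int
  | [], h => h
  | (i, line) :: rest, h => if pvIsStart line then i + 1 else pvHdrLoop rest h

-- second for-loop: for i in range(len(lines)-1, -1, -1), break on first end-marker line.
-- lines[i]: every i produced by the range is in bounds, so pyGetD with default "" is exact here.
def pvFtrLoop (lines : List String) : List Int → Int → Int
  | [], f => f
  | i :: rest, f =>
      if pvIsEnd (PySem.List.pyGetD lines i "") then i else pvFtrLoop lines rest f

def detect_header_footer (lines : List String) : Int × Int :=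
  let header_end := pvHdrLoop (PySem.List.enumerate lines 0) 0
  let footer_start :=
    pvFtrLoop lines (PySem.List.pyRange ((lines.length : Int) - 1) (-1) (-1)) (lines.length : Int)
  (header_end, footer_start)

-- ===== PORT B =====
-- one step of the single forward loop over enumerate(lines); state = (header_end, header_found, footer_start)
def pvAltStep (st : Int × Bool × Int) (p : Int × String) : Int × Bool × Int :=
  let (i, line) := p
  let (h, found, f) := st
  let (h, found) := if !found && pvIsStart line then (i + 1, true) else (h, found)
  let f := if pvIsEnd line then i else f
  (h, found, f)

def detect_header_footer_alt (lines : List String) : Int × Int :=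
  let st := (PySem.List.enumerate lines 0).foldl pvAltStep (0, false, (lines.length : Int))
  (st.1, st.2.2)

-- ===== PRECONDITION & SPEC =====
def Spec_detect_header_footer (lines : List String) (out : Int × Int) : Prop := out = detect_header_footer_alt lines
instance (lines : List String) (out : Int × Int) : Decidable (Spec_detect_header_footer lines out) := by unfold Spec_detect_header_footer; infer_instance

-- ===== CLAIM (what is proved, stated in full; the proofs are below) =====
def Claim_equal_detect_header_footer : Prop := ∀ (lines : List String), Dom_detect_header_footer lines → Spec_detect_header_footer lines (detect_header_footer lines)

-- ===== LEMMAS AND PROOFS =====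

-- forward "last end-marker wins" accumulation, as a recursion (reference shape for both sides)
def pvLastEnd : List (Int × String) → Int → Int
  | [], f => f
  | (i, line) :: rest, f => pvLastEnd rest (if pvIsEnd line then i else f)

theorem pvLastEnd_eq_foldl (ps : List (Int × String)) (f : Int) :
    pvLastEnd ps f = ps.foldl (fun f p => if pvIsEnd p.2 then p.1 else f) f := by
  induction ps generalizing f with
  | nil => rfl
  | cons p rest ih => cases p; simp [pvLastEnd, ih]

-- characterisation of B's fold
theorem pvAlt_fold_char (lines : List String) :
    ∀ (s h f : Int) (found : Bool),
      (PySem.List.enumerate lines s).foldl pvAltStep (h, found, f) =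
        ((if found then h else pvHdrLoop (PySem.List.enumerate lines s) h),
         (found || lines.any pvIsStart),
         pvLastEnd (PySem.List.enumerate lines s) f) := by
  induction lines with
  | nil => intro s h f found; simp [PySem.List.enumerate_nil, pvHdrLoop, pvLastEnd]
  | cons line rest ih =>
      intro s h f found
      rw [PySem.List.enumerate_cons]
      simp only [List.foldl_cons, List.any_cons]
      cases found with
      | false =>
          cases hst : pvIsStart line with
          | false => simp [pvAltStep, hst, ih, pvHdrLoop, pvLastEnd]
          | true => simp [pvAltStep, hst, ih, pvHdrLoop, pvLastEnd]
      | true => simp [pvAltStep, ih, pvLastEnd]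

-- scanning a reversed index list for the FIRST hit = forward fold keeping the LAST hit
theorem pvFtr_reverse (lines : List String) (idxs : List Int) (d : Int) :
    pvFtrLoop lines idxs.reverse d =
      idxs.foldl (fun f i => if pvIsEnd (PySem.List.pyGetD lines i "") then i else f) d := by
  induction idxs generalizing d with
  | nil => rfl
  | cons i rest ih =>
      simp only [List.reverse_cons, List.foldl_cons]
      rw [← ih (if pvIsEnd (PySem.List.pyGetD lines i "") then i else d)]
      generalize rest.reverse = xs
      induction xs generalizing d with
      | nil => rfl
      | cons j xs ihx => simp only [List.cons_append, pvFtrLoop]; split <;> simp [ihx]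

theorem pv_footer_eq (lines : List String) :
    pvFtrLoop lines (PySem.List.pyRange ((lines.length : Int) - 1) (-1) (-1)) (lines.length : Int) =
      pvLastEnd (PySem.List.enumerate lines 0) (lines.length : Int) := by
  have hrev := PySem.List.pyRange_neg_one_eq_reverse ((lines.length : Int) - 1) (-1)
  simp only [neg_add_cancel, sub_add_cancel] at hrev
  rw [hrev, pvFtr_reverse, pvLastEnd_eq_foldl,
      PySem.List.enumerate_eq_map_pyRange (d := ""), List.foldl_map]
  simp [PySem.List.len]

-- ===== VERDICT (by name: the statement is the Claim_ definition above) =====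
theorem detect_header_footer_spec : Claim_equal_detect_header_footer := by
  intro lines _
  show detect_header_footer lines = detect_header_footer_alt lines
  rw [detect_header_footer, detect_header_footer_alt,
      pvAlt_fold_char lines 0 0 (lines.length : Int) false, pv_footer_eq]
  simp
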